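-- pv_equiv track=rewrite | github.com/sproutsai-engg/coding_question_generator | json_files/python_codes/Q_1689.py | containsPattern
-- ===== SOURCE A (Python) =====
-- def containsPattern(arr, m, k):
--     n = len(arr)
--     if m * k > n:
--         return False
--
--     for i in range(n - m * k + 1):
--         patternFound = True
--         for j in range(m):
--             for l in range(1, k):
--                 if arr[i + j] != arr[i + j + l * m]:
--                     patternFound = False
--                     break
--             if not patternFound:
--                 break
--         if patternFound:
--             return True
--     return False
-- ===== SOURCE B (Python) =====
-- def containsPattern(arr, m, k):
--     n = len(arr)
--     if m * k > n:
--         return False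
--     if m <= 0 or k <= 1:
--         return True
--     cnt = 0
--     target = (k - 1) * m
--     for i in range(n - m):
--         if arr[i] == arr[i + m]:
--             cnt += 1
--             if cnt == target:
--                 return True
--         else:
--             cnt = 0
--     return False
-- ===== Notes on version B (the rewrite author's own statement) =====
-- stated objective: alternative
-- what changed: Replaced the triple nested scan (every start i, every offset j, every repetition l) by a single left-to-right pass that counts consecutive positions with arr[i] == arr[i+m] and answers True as soon as the streak reaches (k-1)*m.
import Mathlib
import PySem

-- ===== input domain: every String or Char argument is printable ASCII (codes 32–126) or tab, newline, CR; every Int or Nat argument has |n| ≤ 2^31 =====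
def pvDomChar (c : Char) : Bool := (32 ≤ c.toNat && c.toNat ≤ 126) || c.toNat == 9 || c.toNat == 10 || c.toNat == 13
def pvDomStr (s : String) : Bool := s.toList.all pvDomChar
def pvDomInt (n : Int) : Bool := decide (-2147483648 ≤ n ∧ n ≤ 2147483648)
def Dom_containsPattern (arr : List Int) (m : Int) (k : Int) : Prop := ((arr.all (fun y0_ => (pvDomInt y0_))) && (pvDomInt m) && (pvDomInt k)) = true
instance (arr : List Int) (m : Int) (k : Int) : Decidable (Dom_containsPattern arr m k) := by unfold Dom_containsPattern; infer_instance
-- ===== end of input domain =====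

-- B replaces A's triple nested scan by a single left-to-right pass counting consecutive
-- arr[i]==arr[i+m] matches until the streak reaches (k-1)*m.

-- ===== PORT A =====
-- A's break-on-mismatch inner loops are the obvious `all`s; the outer for-loop with
-- its early `return True` is a recursion over i that stops at the first hit,
-- exactly as Python's lazy `range` loop does.
def aLoop (arr : List Int) (m : Int) (k : Int) (b : Int) (i : Int) : Bool :=
  if _h : i < b then
    if (PySem.List.pyRange 0 m 1).all (fun j =>
        (PySem.List.pyRange 1 k 1).all (fun l =>
          PySem.List.pyGet? arr (i + j) == PySem.List.pyGet? arr (i + j + l * m))) then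
      true
    else aLoop arr m k b (i + 1)
  else false
termination_by (b - i).toNat
decreasing_by omega

def containsPattern (arr : List Int) (m : Int) (k : Int) : Bool :=
  let n : Int := arr.length
  if m * k > n then false
  else aLoop arr m k (n - m * k + 1) 0

-- ===== PORT B =====
-- B's single for-loop with early return: structural recursion over the index list,
-- carrying the streak counter `cnt` exactly as Source B does.
def altLoop (arr : List Int) (m : Int) (target : Int) (cnt : Int) : List Int → Bool
  | [] => false
  | i :: rest =>
    if PySem.List.pyGet? arr i == PySem.List.pyGet? arr (i + m) then
      if cnt + 1 == target then true else altLoop arr m target (cnt + 1) rest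
    else altLoop arr m target 0 rest

def containsPattern_alt (arr : List Int) (m : Int) (k : Int) : Bool :=
  let n : Int := arr.length
  if m * k > n then false
  else if m ≤ 0 || k ≤ 1 then true
  else altLoop arr m ((k - 1) * m) 0 (PySem.List.pyRange 0 (n - m) 1)

-- ===== PRECONDITION & SPEC =====
def Spec_containsPattern (arr : List Int) (m : Int) (k : Int) (out : Bool) : Prop := out = containsPattern_alt arr m k
instance (arr : List Int) (m : Int) (k : Int) (out : Bool) : Decidable (Spec_containsPattern arr m k out) := by unfold Spec_containsPattern; infer_instance

-- ===== CLAIM (what is proved, stated in full; the proofs are below) =====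
def Claim_equal_containsPattern : Prop := ∀ (arr : List Int) (m : Int) (k : Int), Dom_containsPattern arr m k → Spec_containsPattern arr m k (containsPattern arr m k)

-- ===== LEMMAS AND PROOFS =====

-- `P arr m t` : position t matches its copy one period later.
def pMatch (arr : List Int) (m t : Int) : Bool :=
  PySem.List.pyGet? arr t == PySem.List.pyGet? arr (t + m)

-- the common characterisation: a run of `target` consecutive matches starting at s
def Run (arr : List Int) (m target s : Int) : Prop :=
  ∀ t : Int, s ≤ t → t < s + target → pMatch arr m t = true

-- the early-exit loop is `any` over the range
theorem aLoop_eq_any (arr : List Int) (m k : Int) :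
    ∀ (len : Nat) (b i : Int), b - i = (len : Int) →
      aLoop arr m k b i = (PySem.List.pyRange i b 1).any (fun i' =>
        (PySem.List.pyRange 0 m 1).all (fun j =>
          (PySem.List.pyRange 1 k 1).all (fun l =>
            PySem.List.pyGet? arr (i' + j) == PySem.List.pyGet? arr (i' + j + l * m)))) := by
  intro len
  induction len with
  | zero =>
    intro b i hlen
    have hba : b ≤ i := by omega
    rw [aLoop, PySem.List.pyRange_one_eq_nil hba]
    simp [show ¬ i < b by omega]
  | succ d ih =>
    intro b i hlen
    have hib : i < b := by omega
    rw [aLoop, PySem.List.pyRange_one_cons hib, List.any_cons, dif_pos hib,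
      ih b (i + 1) (by omega)]
    by_cases hbody : (PySem.List.pyRange 0 m 1).all (fun j =>
        (PySem.List.pyRange 1 k 1).all (fun l =>
          PySem.List.pyGet? arr (i + j) == PySem.List.pyGet? arr (i + j + l * m))) = true
    · simp [hbody]
    · rw [Bool.not_eq_true] at hbody
      simp [hbody]

-- A = true iff some window works (direct unfolding of any/all over ranges)
theorem a_char (arr : List Int) (m k : Int) (h : ¬ m * k > (arr.length : Int)) :
    containsPattern arr m k = true ↔
      ∃ i : Int, 0 ≤ i ∧ i < (arr.length : Int) - m * k + 1 ∧
        ∀ j : Int, 0 ≤ j → j < m → ∀ l : Int, 1 ≤ l → l < k →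
          PySem.List.pyGet? arr (i + j) = PySem.List.pyGet? arr (i + j + l * m) := by
  have hnn : (0:Int) ≤ (arr.length : Int) - m * k + 1 := by push_neg at h; linarith
  simp only [containsPattern, if_neg h]
  rw [aLoop_eq_any arr m k ((arr.length : Int) - m * k + 1).toNat _ 0 (by omega)]
  simp only [List.any_eq_true, List.all_eq_true, PySem.List.mem_pyRange_one, beq_iff_eq]
  constructor
  · rintro ⟨i, ⟨hi0, hi1⟩, h2⟩
    exact ⟨i, hi0, hi1, fun j hj0 hj1 l hl0 hl1 => h2 j ⟨hj0, hj1⟩ l ⟨hl0, hl1⟩⟩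
  · rintro ⟨i, hi0, hi1, h2⟩
    exact ⟨i, ⟨hi0, hi1⟩, fun j hj l hl => h2 j hj.1 hj.2 l hl.1 hl.2⟩

-- telescoping: a run starting at i gives arr[i+j] = arr[i+j+l*m] for all l ≤ given bound
theorem run_chain (arr : List Int) (m k i : Int) (hm : 1 ≤ m)
    (hrun : Run arr m ((k - 1) * m) i) (j : Int) (hj0 : 0 ≤ j) (hj1 : j < m) :
    ∀ c : Nat, (c : Int) ≤ k - 1 →
      PySem.List.pyGet? arr (i + j) = PySem.List.pyGet? arr (i + j + (c : Int) * m) := by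
  intro c
  induction c with
  | zero => intro _; simp
  | succ d ih =>
    intro hd
    have hd' : (d : Int) ≤ k - 1 := by push_cast at hd ⊢; omega
    have h1 := ih hd'
    have ht : pMatch arr m (i + j + (d : Int) * m) = true := by
      apply hrun
      · have hdm : 0 ≤ (d : Int) * m := mul_nonneg (Int.natCast_nonneg d) (by omega)
        omega
      · have hd2 : (d : Int) + 1 ≤ k - 1 := by push_cast at hd; omega
        have h2 := mul_le_mul_of_nonneg_right hd2 (show (0 : Int) ≤ m by omega)
        nlinarith [h2]
    simp only [pMatch, beq_iff_eq] at ht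
    rw [h1, ht]
    congr 1
    push_cast
    ring
theorem window_iff_run (arr : List Int) (m k i : Int) (hm : 1 ≤ m) (hk : 2 ≤ k) :
    (∀ j : Int, 0 ≤ j → j < m → ∀ l : Int, 1 ≤ l → l < k →
        PySem.List.pyGet? arr (i + j) = PySem.List.pyGet? arr (i + j + l * m))
    ↔ Run arr m ((k - 1) * m) i := by
  constructor
  · intro h t ht0 ht1
    -- write t - i = q*m + j
    set d := t - i with hd
    have hd0 : 0 ≤ d := by omega
    have hd1 : d < (k - 1) * m := by rw [hd]; linarith
    set q := d / m with hq
    set j := d % m with hj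
    have hq0 : 0 ≤ q := Int.ediv_nonneg hd0 (by omega)
    have hj0 : 0 ≤ j := Int.emod_nonneg d (by omega)
    have hj1 : j < m := Int.emod_lt_of_pos d (by omega)
    have hdec : d = m * q + j := by rw [hq, hj]; exact (Int.ediv_add_emod d m).symm
    have hqk : q < k - 1 := by
      by_contra hc
      push_neg at hc
      nlinarith [mul_le_mul_of_nonneg_left hc (show (0 : Int) ≤ m by omega)]
    have e2 : PySem.List.pyGet? arr (i + j) = PySem.List.pyGet? arr (i + j + (q + 1) * m) :=
      h j hj0 hj1 (q + 1) (by omega) (by omega)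
    have key : PySem.List.pyGet? arr (i + d) = PySem.List.pyGet? arr (i + d + m) := by
      rcases eq_or_lt_of_le hq0 with hq0' | hq0'
      · have hdj : d = j := by rw [hdec, ← hq0']; ring
        rw [hdj]
        have := h j hj0 hj1 1 le_rfl (by omega)
        simpa using this
      · have e1 : PySem.List.pyGet? arr (i + j) = PySem.List.pyGet? arr (i + j + q * m) :=
          h j hj0 hj1 q (by omega) (by omega)
        have : i + d = i + j + q * m := by rw [hdec]; ring
        rw [this]
        have : i + j + q * m + m = i + j + (q + 1) * m := by ring
        rw [this, ← e1, e2]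
    simp only [pMatch, beq_iff_eq]
    have : t = i + d := by omega
    rw [this]; exact key
  · intro hrun j hj0 hj1 l hl0 hl1
    have hln : ∃ c : Nat, (c : Int) = l := ⟨l.toNat, by omega⟩
    obtain ⟨c, hc⟩ := hln
    have := run_chain arr m k i hm hrun j hj0 hj1 c (by omega)
    rw [hc] at this; exact this

-- B's loop characterisation: streak-counting over range [a, b) finds exactly
-- the runs of length `target` that start no earlier than a - cnt and end by b.
theorem altLoop_char (arr : List Int) (m target : Int) (htg : 1 ≤ target) :
    ∀ (len : Nat) (a b cnt : Int), b - a = (len : Int) → 0 ≤ cnt → cnt < target →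
    0 ≤ a - cnt → (∀ t : Int, a - cnt ≤ t → t < a → pMatch arr m t = true) →
    (altLoop arr m target cnt (PySem.List.pyRange a b 1) = true ↔
      ∃ s : Int, a - cnt ≤ s ∧ s + target ≤ b ∧ Run arr m target s) := by
  intro len
  induction len with
  | zero =>
    intro a b cnt hab h0 h1 _ _
    have hba : b ≤ a := by omega
    rw [PySem.List.pyRange_one_eq_nil hba]
    simp only [altLoop]
    constructor
    · intro h; exact absurd h (by simp)
    · rintro ⟨s, hs0, hs1, _⟩; omega
  | succ d ih =>
    intro a b cnt hab h0 h1 h2 hpre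
    have hlt : a < b := by omega
    rw [PySem.List.pyRange_one_cons hlt]
    simp only [altLoop]
    by_cases hm : pMatch arr m a = true
    · have hm' : (PySem.List.pyGet? arr a == PySem.List.pyGet? arr (a + m)) = true := hm
      rw [if_pos hm']
      by_cases heq : cnt + 1 = target
      · rw [if_pos (by simpa using heq)]
        simp only [true_iff]
        refine ⟨a - cnt, le_rfl, by omega, ?_⟩
        intro t ht0 ht1
        rcases lt_or_ge t a with h | h
        · exact hpre t ht0 h
        · have : t = a := by omega
          rw [this]; exact hm
      · rw [if_neg (by simpa using heq)]
        rw [ih (a + 1) b (cnt + 1) (by omega) (by omega) (by omega) (by omega)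
          (fun t ht0 ht1 => by
            rcases lt_or_ge t a with h | h
            · exact hpre t (by omega) h
            · have : t = a := by omega
              rw [this]; exact hm)]
        constructor
        · rintro ⟨s, hs0, hs1, hs2⟩; exact ⟨s, by omega, hs1, hs2⟩
        · rintro ⟨s, hs0, hs1, hs2⟩; exact ⟨s, by omega, hs1, hs2⟩
    · have hm' : ¬ (PySem.List.pyGet? arr a == PySem.List.pyGet? arr (a + m)) = true := hm
      rw [if_neg hm']
      rw [ih (a + 1) b 0 (by omega) le_rfl (by omega) (by omega) (fun t ht0 ht1 => by omega)]
      constructor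
      · rintro ⟨s, hs0, hs1, hs2⟩; exact ⟨s, by omega, hs1, hs2⟩
      · rintro ⟨s, hs0, hs1, hs2⟩
        refine ⟨s, ?_, hs1, hs2⟩
        -- the run cannot start at or before a: position a would be inside it and match
        by_contra hc
        push_neg at hc
        have hsa : s ≤ a := by omega
        have hin : a < s + target := by
          by_contra hc2
          push_neg at hc2
          -- run entirely before a: target ≤ a - s ≤ cnt, contradiction
          omega
        exact hm (hs2 a hsa hin)

-- the degenerate case m ≤ 0 ∨ k ≤ 1 (with m*k ≤ n): A finds the empty pattern at i = 0
theorem a_degenerate (arr : List Int) (m k : Int) (h : ¬ m * k > (arr.length : Int))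
    (hd : m ≤ 0 ∨ k ≤ 1) : containsPattern arr m k = true := by
  push_neg at h
  have hnn : (0:Int) ≤ (arr.length : Int) - m * k + 1 := by linarith
  simp only [containsPattern, if_neg (not_lt.mpr h)]
  rw [aLoop_eq_any arr m k ((arr.length : Int) - m * k + 1).toNat _ 0 (by omega)]
  simp only [List.any_eq_true]
  refine ⟨0, ?_, ?_⟩
  · rw [PySem.List.mem_pyRange_one]
    exact ⟨le_rfl, by linarith⟩
  · rcases hd with hd | hd
    · rw [PySem.List.pyRange_one_eq_nil hd]
      simp
    · simp only [List.all_eq_true]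
      intro j _
      rw [PySem.List.pyRange_one_eq_nil hd]
      simp

-- ===== VERDICT (by name: the statement is the Claim_ definition above) =====
theorem containsPattern_spec : Claim_equal_containsPattern := by
  intro arr m k _
  unfold Spec_containsPattern
  by_cases hgt : m * k > (arr.length : Int)
  · simp only [containsPattern, containsPattern_alt, if_pos hgt]
  · by_cases hdeg : m ≤ 0 ∨ k ≤ 1
    · have hA := a_degenerate arr m k hgt hdeg
      have hB : containsPattern_alt arr m k = true := by
        simp only [containsPattern_alt, if_neg hgt]
        rw [if_pos (by rcases hdeg with h | h <;> simp [h])]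
      rw [hA, hB]
    · push_neg at hdeg
      obtain ⟨hm, hk⟩ := hdeg
      have hm1 : 1 ≤ m := by omega
      have hk2 : 2 ≤ k := by omega
      have hmk : m * k ≤ (arr.length : Int) := not_lt.mp hgt
      have hmn : m ≤ (arr.length : Int) := by nlinarith
      have hexp : (k - 1) * m + m = m * k := by ring
      have htg : 1 ≤ (k - 1) * m := by nlinarith
      have hB : containsPattern_alt arr m k =
          altLoop arr m ((k - 1) * m) 0 (PySem.List.pyRange 0 ((arr.length : Int) - m) 1) := by
        simp only [containsPattern_alt, if_neg hgt]
        rw [if_neg (by simp; omega)]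
      have hBc := altLoop_char arr m ((k - 1) * m) htg ((arr.length : Int) - m).toNat
        0 ((arr.length : Int) - m) 0 (by omega) le_rfl (by omega) (by omega)
        (fun t ht0 ht1 => by omega)
      have hAc := a_char arr m k hgt
      -- both sides are Bool; compare via their true-characterisations
      cases hA : containsPattern arr m k
      · cases hB' : containsPattern_alt arr m k
        · rfl
        · exfalso
          rw [hB] at hB'
          obtain ⟨s, hs0, hs1, hs2⟩ := hBc.mp hB'
          have : containsPattern arr m k = true := by
            rw [hAc]
            refine ⟨s, by omega, by linarith, ?_⟩
            exact (window_iff_run arr m k s hm1 hk2).mpr hs2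
          rw [hA] at this; exact Bool.false_ne_true this
      · obtain ⟨i, hi0, hi1, hi2⟩ := hAc.mp hA
        have hrun : Run arr m ((k - 1) * m) i := (window_iff_run arr m k i hm1 hk2).mp hi2
        have : containsPattern_alt arr m k = true := by
          rw [hB]
          exact hBc.mpr ⟨i, by omega, by linarith, hrun⟩
        rw [this]
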